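-- pv_equiv track=rewrite | github.com/bpupadhyaya/programming-interviews | top/topamzbyfrequency/python/group3/maximum_number_of_books_you_can_take.py | maximum_books
-- ===== SOURCE A (Python) =====
-- from typing import List
--
-- def maximum_books(books: List[int]) -> int:
--     n = len(books)
--     dp, stack = [0] * n, []
--     for i in range(n):
--         if books[i] == 0:
--             stack.append(i)
--             continue
--         while stack:
--             j = stack[-1]
--             if books[j] >= books[i] - (i - j):
--                 stack.pop()
--             else:
--                 break
--         if not stack:
--             j = -1
--         if books[i] - i + j + 1 < 0:
--             dp[i] = books[i] * (books[i] + 1) // 2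
--         else:
--             dp[i] = (books[i] + books[i] - i + j + 1) * (i - j) // 2
--         if j >= 0:
--             dp[i] += dp[j]
--         stack.append(i)
--     return max(dp)
-- ===== SOURCE B (Python) =====
-- from typing import List
--
-- def maximum_books(books: List[int]) -> int:
--     n = len(books)
--     dp = [0] * n
--     for i in range(n):
--         if books[i] == 0:
--             continue
--         j = i - 1
--         while j >= 0 and books[j] - j >= books[i] - i:
--             j -= 1
--         take = books[i] - (i - j) + 1
--         if take < 0:
--             dp[i] = books[i] * (books[i] + 1) // 2
--         else:
--             dp[i] = (books[i] + take) * (i - j) // 2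
--         if j >= 0:
--             dp[i] += dp[j]
--     return max(dp)
-- ===== Notes on version B (the rewrite author's own statement) =====
-- stated objective: simpler
-- what changed: Replaced the monotonic stack maintained across iterations with a direct per-index backward scan that finds the nearest limiting shelf, keeping the closed-form series sum and the dp array; no stack state to maintain.
import Mathlib
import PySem

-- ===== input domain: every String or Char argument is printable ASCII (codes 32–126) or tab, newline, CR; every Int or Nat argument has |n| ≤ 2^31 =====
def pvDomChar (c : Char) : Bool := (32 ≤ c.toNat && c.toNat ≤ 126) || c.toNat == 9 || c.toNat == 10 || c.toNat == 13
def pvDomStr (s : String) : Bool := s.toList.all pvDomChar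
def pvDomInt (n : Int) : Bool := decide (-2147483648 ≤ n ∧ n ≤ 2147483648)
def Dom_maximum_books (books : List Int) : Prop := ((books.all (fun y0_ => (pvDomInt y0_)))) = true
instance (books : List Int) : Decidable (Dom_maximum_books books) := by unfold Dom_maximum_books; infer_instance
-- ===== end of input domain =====

-- B replaces A's monotonic stack by a per-index backward scan for the nearest limiting shelf
-- (same closed-form series); simpler, not faster.

-- ===== PORT A =====
-- the inner `while stack:` pop loop (stack kept head-as-top; Python appends/pops at the end)
def pvPopA (books : List Int) (i bi : Int) : List Int → List Int
  | [] => []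
  | j :: rest =>
      if books.getD j.toNat 0 ≥ bi - (i - j) then pvPopA books i bi rest
      else j :: rest

-- one iteration of A's `for i in range(n)` loop on the state (dp, stack)
def pvStepA (books : List Int) (st : List Int × List Int) (iN : Nat) : List Int × List Int :=
  let i : Int := (iN : Int)
  let bi := books.getD iN 0
  if bi = 0 then (st.1, i :: st.2)
  else
    let stack' := pvPopA books i bi st.2
    let j : Int := match stack' with | [] => -1 | t :: _ => t
    let base : Int :=
      if bi - i + j + 1 < 0 then PySem.Int.floordiv (bi * (bi + 1)) 2
      else PySem.Int.floordiv ((bi + bi - i + j + 1) * (i - j)) 2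
    let v : Int := if 0 ≤ j then base + st.1.getD j.toNat 0 else base
    (st.1.set iN v, i :: stack')

def maximum_books (books : List Int) : Int :=
  let n := books.length
  let res := (List.range n).foldl (pvStepA books) (List.replicate n 0, [])
  (PySem.List.max? res.1 (fun y => y)).getD 0

-- ===== PORT B =====
-- B's inner `while j >= 0 and books[j] - j >= books[i] - i` scan, fuel = j + 1
def pvScanB (books : List Int) (ci : Int) : Nat → Int
  | 0 => -1
  | j + 1 => if books.getD j 0 - (j : Int) ≥ ci then pvScanB books ci j else (j : Int)

-- one iteration of B's `for i in range(n)` loop on dp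
def pvStepB (books : List Int) (dp : List Int) (i : Nat) : List Int :=
  if books.getD i 0 = 0 then dp
  else
    let j : Int := pvScanB books (books.getD i 0 - (i : Int)) i
    let take : Int := books.getD i 0 - ((i : Int) - j) + 1
    let v : Int :=
      if take < 0 then PySem.Int.floordiv (books.getD i 0 * (books.getD i 0 + 1)) 2
      else PySem.Int.floordiv ((books.getD i 0 + take) * ((i : Int) - j)) 2
    dp.set i (if 0 ≤ j then v + dp.getD j.toNat 0 else v)

def maximum_books_alt (books : List Int) : Int :=
  let dp := (List.range books.length).foldl (pvStepB books) (List.replicate books.length 0)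
  (PySem.List.max? dp (fun y => y)).getD 0

-- ===== PRECONDITION & SPEC =====
-- Pre_ excludes only the empty list, on which A raises ValueError (max of an empty dp).
def Pre_maximum_books (books : List Int) : Prop := books ≠ []
instance (books : List Int) : Decidable (Pre_maximum_books books) := by
  unfold Pre_maximum_books; infer_instance

def pvWitness_maximum_books : List Int := [2, 5, 4, 0, 3]

def Spec_maximum_books (books : List Int) (out : Int) : Prop := out = maximum_books_alt books
instance (books : List Int) (out : Int) : Decidable (Spec_maximum_books books out) := by
  unfold Spec_maximum_books; infer_instance

-- ===== CLAIM (what is proved, stated in full; the proofs are below) =====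
def Claim_equal_maximum_books : Prop := ∀ (books : List Int), Dom_maximum_books books →
  Pre_maximum_books books → Spec_maximum_books books (maximum_books books)

-- ===== LEMMAS AND PROOFS =====

-- books.getD t 0 - t, the key A's pop condition compares: books[j] >= books[i] - (i - j)
-- is exactly pvCK books j ≥ pvCK books i, and B's scan condition is the same comparison.
def pvCK (books : List Int) (t : Nat) : Int := books.getD t 0 - (t : Int)

-- stack invariant carried through A's loop (after processing indices < i)
def pvInv (books : List Int) (i : Nat) (stack : List Int) : Prop :=
  (∀ j ∈ stack, ∃ t : Nat, j = (t : Int) ∧ t < i) ∧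
  List.Pairwise (fun a b => b < a) stack ∧
  (∀ t : Nat, t < i → (t : Int) ∉ stack →
    ∃ s : Nat, (s : Int) ∈ stack ∧ t < s ∧ pvCK books s ≤ pvCK books t)

lemma pvPopA_prefix (books : List Int) (i bi : Int) :
    ∀ stack : List Int, ∃ popped, stack = popped ++ pvPopA books i bi stack ∧
      ∀ j ∈ popped, books.getD j.toNat 0 ≥ bi - (i - j) := by
  intro stack
  induction stack with
  | nil => exact ⟨[], by simp [pvPopA]⟩
  | cons j rest ih =>
      by_cases h : books.getD j.toNat 0 ≥ bi - (i - j)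
      · obtain ⟨p, hp, hcond⟩ := ih
        refine ⟨j :: p, ?_, ?_⟩
        · simp only [pvPopA, if_pos h, List.cons_append]
          exact congrArg (j :: ·) hp
        · intro x hx
          rcases List.mem_cons.mp hx with rfl | hx
          · exact h
          · exact hcond x hx
      · refine ⟨[], ?_, by simp⟩
        simp only [pvPopA, if_neg h, List.nil_append]

lemma pvPopA_head (books : List Int) (i bi : Int) :
    ∀ (stack : List Int) (j : Int) (tail : List Int),
      pvPopA books i bi stack = j :: tail → books.getD j.toNat 0 < bi - (i - j) := by
  intro stack
  induction stack with
  | nil => intro j tail h; simp [pvPopA] at h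
  | cons x rest ih =>
      intro j tail h
      simp only [pvPopA] at h
      split_ifs at h with hc
      · exact ih j tail h
      · injection h with h1 _
        subst h1
        omega

lemma pvPopA_suffix (books : List Int) (i bi : Int) (stack : List Int) :
    (pvPopA books i bi stack).Sublist stack := by
  obtain ⟨p, hp, _⟩ := pvPopA_prefix books i bi stack
  have := List.sublist_append_right p (pvPopA books i bi stack)
  rwa [← hp] at this

-- the element A's pops stop at is the NEAREST index t < i with pvCK t < pvCK i
lemma pvPopA_finds (books : List Int) (i : Nat) (stack : List Int)
    (hinv : pvInv books i stack) :
    (pvPopA books (i : Int) (books.getD i 0) stack = [] →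
       ∀ t : Nat, t < i → pvCK books i ≤ pvCK books t) ∧
    (∀ (jh : Int) (tail : List Int),
       pvPopA books (i : Int) (books.getD i 0) stack = jh :: tail →
       ∃ s : Nat, jh = (s : Int) ∧ s < i ∧ pvCK books s < pvCK books i ∧
         ∀ t : Nat, s < t → t < i → pvCK books i ≤ pvCK books t) := by
  obtain ⟨helem, hsorted, hcomp⟩ := hinv
  obtain ⟨p, hp, hpop⟩ := pvPopA_prefix books (i : Int) (books.getD i 0) stack
  constructor
  · intro hempty t ht
    have hstack : stack = p := by rw [hp, hempty, List.append_nil]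
    by_cases hmem : (t : Int) ∈ stack
    · have h := hpop _ (hstack ▸ hmem)
      simp only [Int.toNat_natCast] at h
      simp only [pvCK]; omega
    · obtain ⟨s, hsmem, hts, hle⟩ := hcomp t ht hmem
      have h := hpop _ (hstack ▸ hsmem)
      simp only [Int.toNat_natCast] at h
      simp only [pvCK] at hle ⊢; omega
  · intro jh tail heq
    have hhead := pvPopA_head books (i : Int) (books.getD i 0) stack jh tail heq
    have hsub := pvPopA_suffix books (i : Int) (books.getD i 0) stack
    have hjmem : jh ∈ stack := hsub.subset (by rw [heq]; exact List.mem_cons_self ..)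
    obtain ⟨s, rfl, hsi⟩ := helem jh hjmem
    have hck : pvCK books s < pvCK books i := by
      simp only [Int.toNat_natCast] at hhead
      simp only [pvCK]; omega
    refine ⟨s, rfl, hsi, hck, ?_⟩
    have hstack'le : ∀ x ∈ pvPopA books (i : Int) (books.getD i 0) stack, x ≤ (s : Int) := by
      intro x hx
      rw [heq] at hx
      rcases List.mem_cons.mp hx with rfl | hx
      · exact le_refl _
      · have hps := hsorted.sublist hsub
        rw [heq] at hps
        exact le_of_lt ((List.pairwise_cons.mp hps).1 x hx)
    intro t hst hti
    by_cases hmem : (t : Int) ∈ stack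
    · have htp : (t : Int) ∈ p := by
        rcases List.mem_append.mp (hp ▸ hmem) with h | h
        · exact h
        · exact absurd (hstack'le _ h) (by omega)
      have h := hpop _ htp
      simp only [Int.toNat_natCast] at h
      simp only [pvCK]; omega
    · obtain ⟨s', hs'mem, hts', hle⟩ := hcomp t hti hmem
      have hs'p : (s' : Int) ∈ p := by
        rcases List.mem_append.mp (hp ▸ hs'mem) with h | h
        · exact h
        · exact absurd (hstack'le _ h) (by omega)
      have h := hpop _ hs'p
      simp only [Int.toNat_natCast] at h
      simp only [pvCK] at hle ⊢; omega

-- B's scan returns -1 when no index below m satisfies pvCK t < ci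
lemma pvScanB_none (books : List Int) (ci : Int) :
    ∀ m : Nat, (∀ t : Nat, t < m → ci ≤ pvCK books t) → pvScanB books ci m = -1 := by
  intro m
  induction m with
  | zero => intro _; rfl
  | succ m ih =>
      intro h
      have hm := h m (by omega)
      simp only [pvCK] at hm
      rw [pvScanB, if_pos (by omega)]
      exact ih (fun t ht => h t (by omega))

-- B's scan returns the nearest s below m with pvCK s < ci
lemma pvScanB_found (books : List Int) (ci : Int) (s : Nat) :
    ∀ m : Nat, s < m → pvCK books s < ci →
      (∀ t : Nat, s < t → t < m → ci ≤ pvCK books t) →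
      pvScanB books ci m = (s : Int) := by
  intro m
  induction m with
  | zero => intro h; omega
  | succ m ih =>
      intro hsm hs hnear
      by_cases he : s = m
      · subst he
        simp only [pvCK] at hs
        rw [pvScanB, if_neg (by omega)]
      · have hm := hnear m (by omega) (by omega)
        simp only [pvCK] at hm
        rw [pvScanB, if_pos (by omega)]
        exact ih (by omega) hs (fun t ht htm => hnear t ht (by omega))

-- the joint induction: A's dp equals B's dp and A's stack satisfies pvInv
lemma pv_main (books : List Int) :
    ∀ i : Nat, i ≤ books.length →
      ((List.range i).foldl (pvStepA books) (List.replicate books.length 0, [])).1 =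
        (List.range i).foldl (pvStepB books) (List.replicate books.length 0) ∧
      pvInv books i ((List.range i).foldl (pvStepA books) (List.replicate books.length 0, [])).2 := by
  intro i
  induction i with
  | zero => exact fun _ => ⟨rfl, by simp, by simp, by simp⟩
  | succ i ih =>
      intro hle
      have hi : i < books.length := by omega
      obtain ⟨hdp, hinv⟩ := ih (by omega)
      simp only [List.range_succ, List.foldl_append, List.foldl_cons, List.foldl_nil]
      set stA := (List.range i).foldl (pvStepA books) (List.replicate books.length 0, []) with hstA
      set dp := (List.range i).foldl (pvStepB books) (List.replicate books.length 0) with hdpB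
      by_cases h0 : books.getD i 0 = 0
      · -- zero shelf: A pushes i without popping, dp untouched on both sides
        have hstepA : pvStepA books stA i = (stA.1, (i : Int) :: stA.2) := by
          simp only [pvStepA]
          rw [if_pos h0]
        have hstepB : pvStepB books dp i = dp := by
          rw [pvStepB, if_pos h0]
        refine ⟨?_, ?_⟩
        · rw [hstepA, hstepB]; exact hdp
        · rw [hstepA]
          obtain ⟨helem, hsort, hcomp⟩ := hinv
          refine ⟨?_, ?_, ?_⟩
          · intro j hj
            rcases List.mem_cons.mp hj with rfl | hj
            · exact ⟨i, rfl, by omega⟩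
            · obtain ⟨t, rfl, ht⟩ := helem j hj
              exact ⟨t, rfl, by omega⟩
          · refine List.pairwise_cons.mpr ⟨?_, hsort⟩
            intro x hx
            obtain ⟨t, rfl, ht⟩ := helem x hx
            exact_mod_cast ht
          · intro t ht htmem
            have ht' : t < i := by
              rcases Nat.lt_succ_iff_lt_or_eq.mp ht with h | rfl
              · exact h
              · exact absurd (List.mem_cons_self ..) htmem
            obtain ⟨s, hsmem, hts, hck⟩ :=
              hcomp t ht' (fun hc => htmem (List.mem_cons_of_mem _ hc))
            exact ⟨s, List.mem_cons_of_mem _ hsmem, hts, hck⟩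
      · -- nonzero shelf
        set stk' := pvPopA books (i : Int) (books.getD i 0) stA.2 with hstk'
        have hfinds := pvPopA_finds books i stA.2 hinv
        obtain ⟨p, hp, hpop⟩ := pvPopA_prefix books (i : Int) (books.getD i 0) stA.2
        have hsub : stk'.Sublist stA.2 := pvPopA_suffix books (i : Int) (books.getD i 0) stA.2
        have hinv' : pvInv books (i + 1) ((i : Int) :: stk') := by
          obtain ⟨helem, hsort, hcomp⟩ := hinv
          refine ⟨?_, ?_, ?_⟩
          · intro j hj
            rcases List.mem_cons.mp hj with rfl | hj
            · exact ⟨i, rfl, by omega⟩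
            · obtain ⟨t, rfl, ht⟩ := helem j (hsub.subset hj)
              exact ⟨t, rfl, by omega⟩
          · refine List.pairwise_cons.mpr ⟨?_, hsort.sublist hsub⟩
            intro x hx
            obtain ⟨t, rfl, ht⟩ := helem x (hsub.subset hx)
            exact_mod_cast ht
          · intro t ht htmem
            have ht' : t < i := by
              rcases Nat.lt_succ_iff_lt_or_eq.mp ht with h | rfl
              · exact h
              · exact absurd (List.mem_cons_self ..) htmem
            have htmem' : (t : Int) ∉ stk' := fun hc => htmem (List.mem_cons_of_mem _ hc)
            by_cases hms : (t : Int) ∈ stA.2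
            · have htp : (t : Int) ∈ p := by
                rcases List.mem_append.mp (hp ▸ hms) with h | h
                · exact h
                · exact absurd h (hstk' ▸ htmem')
              have hc := hpop _ htp
              simp only [Int.toNat_natCast] at hc
              refine ⟨i, List.mem_cons_self .., ht', ?_⟩
              simp only [pvCK]; omega
            · obtain ⟨s, hsmem, hts, hck⟩ := hcomp t ht' hms
              by_cases hs' : (s : Int) ∈ stk'
              · exact ⟨s, List.mem_cons_of_mem _ hs', hts, hck⟩
              · have hsp : (s : Int) ∈ p := by
                  rcases List.mem_append.mp (hp ▸ hsmem) with h | h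
                  · exact h
                  · exact absurd h (hstk' ▸ hs')
                have hc := hpop _ hsp
                simp only [Int.toNat_natCast] at hc
                refine ⟨i, List.mem_cons_self .., ht', ?_⟩
                simp only [pvCK] at hck ⊢
                omega
        cases hE : stk' with
        | nil =>
            have hnb := hfinds.1 (hstk' ▸ hE)
            have hscan : pvScanB books (books.getD i 0 - (i : Int)) i = -1 := by
              apply pvScanB_none
              intro t ht
              have := hnb t ht
              simp only [pvCK] at this ⊢
              omega
            have hstepA : pvStepA books stA i =
                (stA.1.set i
                  (if books.getD i 0 - (i : Int) + (-1) + 1 < 0 then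
                    PySem.Int.floordiv (books.getD i 0 * (books.getD i 0 + 1)) 2
                  else
                    PySem.Int.floordiv
                      ((books.getD i 0 + books.getD i 0 - (i : Int) + (-1) + 1) *
                        ((i : Int) - (-1))) 2),
                 (i : Int) :: []) := by
              simp only [pvStepA]
              rw [if_neg h0, (hstk' ▸ hE : pvPopA books (i : Int) (books.getD i 0) stA.2 = [])]
              norm_num
            have hstepB : pvStepB books dp i =
                dp.set i
                  (if books.getD i 0 - ((i : Int) - (-1)) + 1 < 0 then
                    PySem.Int.floordiv (books.getD i 0 * (books.getD i 0 + 1)) 2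
                  else
                    PySem.Int.floordiv
                      ((books.getD i 0 + (books.getD i 0 - ((i : Int) - (-1)) + 1)) *
                        ((i : Int) - (-1))) 2) := by
              rw [pvStepB, if_neg h0]
              simp only [hscan]
              rw [if_neg (by omega : ¬ (0 : Int) ≤ -1)]
            refine ⟨?_, ?_⟩
            · rw [hstepA, hstepB, hdp]
              by_cases hc : books.getD i 0 - (i : Int) < 0
              · rw [if_pos (by omega : books.getD i 0 - (i : Int) + (-1) + 1 < 0),
                  if_pos (by omega : books.getD i 0 - ((i : Int) - (-1)) + 1 < 0)]
              · rw [if_neg (by omega : ¬ books.getD i 0 - (i : Int) + (-1) + 1 < 0),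
                  if_neg (by omega : ¬ books.getD i 0 - ((i : Int) - (-1)) + 1 < 0),
                  show (books.getD i 0 + (books.getD i 0 - ((i : Int) - (-1)) + 1)) *
                      ((i : Int) - (-1)) =
                    (books.getD i 0 + books.getD i 0 - (i : Int) + (-1) + 1) *
                      ((i : Int) - (-1)) from by ring]
            · rw [hstepA]
              exact hE ▸ hinv'
        | cons jh tail =>
            obtain ⟨s, rfl, hsi, hck, hnear⟩ := hfinds.2 jh tail (hstk' ▸ hE)
            have hscan : pvScanB books (books.getD i 0 - (i : Int)) i = (s : Int) := by
              apply pvScanB_found books _ s i hsi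
              · simp only [pvCK] at hck ⊢
                omega
              · intro t hst hti
                have := hnear t hst hti
                simp only [pvCK] at this ⊢
                omega
            have hstepA : pvStepA books stA i =
                (stA.1.set i
                  ((if books.getD i 0 - (i : Int) + (s : Int) + 1 < 0 then
                    PySem.Int.floordiv (books.getD i 0 * (books.getD i 0 + 1)) 2
                  else
                    PySem.Int.floordiv
                      ((books.getD i 0 + books.getD i 0 - (i : Int) + (s : Int) + 1) *
                        ((i : Int) - (s : Int))) 2) + stA.1.getD s 0),
                 (i : Int) :: ((s : Int) :: tail)) := by
              simp only [pvStepA]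
              rw [if_neg h0,
                (hstk' ▸ hE : pvPopA books (i : Int) (books.getD i 0) stA.2 = (s : Int) :: tail)]
              rw [if_pos (by positivity : (0 : Int) ≤ (s : Int))]
              simp
            have hstepB : pvStepB books dp i =
                dp.set i
                  ((if books.getD i 0 - ((i : Int) - (s : Int)) + 1 < 0 then
                    PySem.Int.floordiv (books.getD i 0 * (books.getD i 0 + 1)) 2
                  else
                    PySem.Int.floordiv
                      ((books.getD i 0 + (books.getD i 0 - ((i : Int) - (s : Int)) + 1)) *
                        ((i : Int) - (s : Int))) 2) + dp.getD s 0) := by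
              rw [pvStepB, if_neg h0]
              simp only [hscan]
              rw [if_pos (by positivity : (0 : Int) ≤ (s : Int))]
              simp
            refine ⟨?_, ?_⟩
            · rw [hstepA, hstepB, hdp]
              by_cases hc : books.getD i 0 - (i : Int) + (s : Int) + 1 < 0
              · rw [if_pos hc,
                  if_pos (by omega : books.getD i 0 - ((i : Int) - (s : Int)) + 1 < 0)]
              · rw [if_neg hc,
                  if_neg (by omega : ¬ books.getD i 0 - ((i : Int) - (s : Int)) + 1 < 0),
                  show (books.getD i 0 + (books.getD i 0 - ((i : Int) - (s : Int)) + 1)) *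
                      ((i : Int) - (s : Int)) =
                    (books.getD i 0 + books.getD i 0 - (i : Int) + (s : Int) + 1) *
                      ((i : Int) - (s : Int)) from by ring]
            · rw [hstepA]
              exact hE ▸ hinv'

-- ===== VERDICT (by name: the statement is the Claim_ definition above) =====
theorem maximum_books_spec : Claim_equal_maximum_books := by
  intro books _ _
  have h := (pv_main books books.length le_rfl).1
  unfold Spec_maximum_books maximum_books maximum_books_alt
  simp only [h]
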